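-- pv_equiv track=rewrite | github.com/ginnocen/ALICETreeCreator | ALICEanalysis/code/utilities/utilitiesGeneral.py | make_lst_str_2
-- ===== SOURCE A (Python) =====
-- import itertools
--
-- def makestring(tpl):
--   lst = list(tpl)
--   string = ""
--   for i in range(0,len(lst)):
--     string+=str(lst[i])
--     if(i<len(lst)-1):
--       string+="/"
--   return string
--
-- def make_lst_str_2(sets,ix,lst_str):
--   i=ix
--   lst_str_2=[]
--   comb=list(itertools.product(lst_str,sets[i]))
--   for tpl in comb:
--     lst_str_2.append(makestring(tpl))
--   i+=1
--   if(i==len(sets)):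
--     return lst_str_2
--   else:
--     return make_lst_str_2(sets,i,lst_str_2)
-- ===== SOURCE B (Python) =====
-- import itertools
--
-- def make_lst_str_2(sets, ix, lst_str):
--     result = lst_str
--     for i in range(ix, len(sets)):
--         result = [a + "/" + b for a, b in itertools.product(result, sets[i])]
--     return result
-- ===== Notes on version B (the rewrite author's own statement) =====
-- stated objective: simpler
-- what changed: Replaced the tail recursion plus the element-by-element makestring/append helper loops with a single iterative fold over the index range using a list comprehension that joins each pair directly.
import Mathlib
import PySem

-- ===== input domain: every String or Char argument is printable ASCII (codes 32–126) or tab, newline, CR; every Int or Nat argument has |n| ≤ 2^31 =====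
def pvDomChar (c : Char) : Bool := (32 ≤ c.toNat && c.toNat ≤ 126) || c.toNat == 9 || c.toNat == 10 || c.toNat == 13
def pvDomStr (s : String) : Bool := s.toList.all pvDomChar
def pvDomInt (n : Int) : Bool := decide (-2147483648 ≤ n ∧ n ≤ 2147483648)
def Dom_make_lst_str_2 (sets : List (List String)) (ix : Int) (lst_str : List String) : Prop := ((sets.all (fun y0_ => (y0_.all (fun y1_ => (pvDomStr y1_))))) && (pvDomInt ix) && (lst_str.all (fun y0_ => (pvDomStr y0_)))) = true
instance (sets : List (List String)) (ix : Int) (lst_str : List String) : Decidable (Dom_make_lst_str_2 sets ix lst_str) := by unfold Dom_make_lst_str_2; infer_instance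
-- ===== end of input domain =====

-- B replaces A's tail recursion and its makestring helper by a single iterative fold
-- over the index range, joining each product pair directly (objective: simpler).

-- ===== PORT A =====
-- makestring(tpl): join the elements of the 2-tuple with "/" via an index loop
def pvMakestring (tpl : String × String) : String :=
  let lst := [tpl.1, tpl.2]
  (PySem.List.pyRange 0 (PySem.List.len lst) 1).foldl
    (fun s i =>
      let s := s ++ (PySem.List.pyGet? lst i).getD ""
      if i < PySem.List.len lst - 1 then s ++ "/" else s) ""

def make_lst_str_2 (sets : List (List String)) (ix : Int) (lst_str : List String) : List String :=
  match h : PySem.List.pyGet? sets ix with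
  | none => []   -- Python raises IndexError here (sets[ix] out of range); excluded by Pre_
  | some s =>
      -- comb = list(itertools.product(lst_str, sets[i])); loop appending makestring(tpl)
      let comb := lst_str.flatMap (fun a => s.map (fun b => (a, b)))
      let lst_str_2 := comb.map pvMakestring
      if ix + 1 = PySem.List.len sets then lst_str_2
      else make_lst_str_2 sets (ix + 1) lst_str_2
termination_by (PySem.List.len sets + 1 - ix).toNat
decreasing_by
  have hin : PySem.Raise.InRange sets.length ix := by
    by_contra hc
    rw [← PySem.List.pyGet?_eq_none_iff] at hc
    simp [hc] at h
  simp only [PySem.Raise.InRange] at hin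
  simp only [PySem.List.len_eq]
  omega

-- ===== PORT B =====
def make_lst_str_2_alt (sets : List (List String)) (ix : Int) (lst_str : List String) : List String :=
  (PySem.List.pyRange ix (PySem.List.len sets) 1).foldl
    (fun result i =>
      result.flatMap (fun a => ((PySem.List.pyGet? sets i).getD []).map (fun b => a ++ "/" ++ b)))
    lst_str

-- ===== PRECONDITION & SPEC =====
-- Pre_ excludes exactly the inputs where A raises IndexError: ix outside Python's index range of sets.
def Pre_make_lst_str_2 (sets : List (List String)) (ix : Int) (lst_str : List String) : Prop :=
  PySem.Raise.InRange sets.length ix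
instance (sets : List (List String)) (ix : Int) (lst_str : List String) : Decidable (Pre_make_lst_str_2 sets ix lst_str) := by unfold Pre_make_lst_str_2; infer_instance

def pvWitness_make_lst_str_2 : List (List String) × Int × List String := ([["a", "b"], ["c"]], 0, ["x", "y"])

def Spec_make_lst_str_2 (sets : List (List String)) (ix : Int) (lst_str : List String) (out : List String) : Prop := out = make_lst_str_2_alt sets ix lst_str
instance (sets : List (List String)) (ix : Int) (lst_str : List String) (out : List String) : Decidable (Spec_make_lst_str_2 sets ix lst_str out) := by unfold Spec_make_lst_str_2; infer_instance

-- ===== CLAIM (what is proved, stated in full; the proofs are below) =====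
def Claim_equal_make_lst_str_2 : Prop := ∀ (sets : List (List String)) (ix : Int) (lst_str : List String), Dom_make_lst_str_2 sets ix lst_str → Pre_make_lst_str_2 sets ix lst_str → Spec_make_lst_str_2 sets ix lst_str (make_lst_str_2 sets ix lst_str)


-- ===== LEMMAS AND PROOFS =====

theorem pvMakestring_eq (a b : String) : pvMakestring (a, b) = a ++ "/" ++ b := by
  simp only [pvMakestring, PySem.List.len_eq, List.length_cons, List.length_nil]
  norm_num
  rw [show PySem.List.pyRange 0 2 1 = [0, 1] from by decide]
  simp only [List.foldl_cons, List.foldl_nil, PySem.List.pyGet?_zero_cons, Option.getD_some]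
  rw [show PySem.List.pyGet? [a, b] 1 = some b from by
    rw [show (1 : Int) = ((1 : Nat) : Int) from rfl, PySem.List.pyGet?_natCast]; rfl]
  norm_num [String.append_assoc]

theorem pv_level_eq (s : List String) (l : List String) :
    (l.flatMap (fun a => s.map (fun b => (a, b)))).map pvMakestring
      = l.flatMap (fun a => s.map (fun b => a ++ "/" ++ b)) := by
  rw [List.map_flatMap]
  simp only [List.map_map, Function.comp_def, pvMakestring_eq]

theorem pv_main (sets : List (List String)) : ∀ (k : Nat) (ix : Int) (l : List String),
    (sets.length + 1 - ix).toNat ≤ k → PySem.Raise.InRange sets.length ix →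
    make_lst_str_2 sets ix l = make_lst_str_2_alt sets ix l := by
  intro k
  induction k with
  | zero =>
    intro ix l hk hin
    simp only [PySem.Raise.InRange] at hin
    omega
  | succ k ih =>
    intro ix l hk hin
    have hin' := hin
    simp only [PySem.Raise.InRange] at hin'
    obtain ⟨s, hs⟩ : ∃ s, PySem.List.pyGet? sets ix = some s := by
      cases hget : PySem.List.pyGet? sets ix with
      | none => rw [PySem.List.pyGet?_eq_none_iff] at hget; exact absurd hin hget
      | some s => exact ⟨s, rfl⟩
    have hcons : PySem.List.pyRange ix (PySem.List.len sets) 1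
        = ix :: PySem.List.pyRange (ix + 1) (PySem.List.len sets) 1 := by
      rw [PySem.List.len_eq]
      exact PySem.List.pyRange_one_cons (by exact_mod_cast hin'.2)
    rw [make_lst_str_2]
    rw [hs]
    simp only
    unfold make_lst_str_2_alt
    rw [hcons]
    simp only [List.foldl_cons, hs, Option.getD_some]
    rw [← pv_level_eq s l]
    set l2 := (l.flatMap (fun a => s.map (fun b => (a, b)))).map pvMakestring with hl2
    by_cases hend : ix + 1 = PySem.List.len sets
    · rw [if_pos hend]
      rw [hend, PySem.List.pyRange_one_eq_nil (le_refl _)]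
      rfl
    · rw [if_neg hend]
      rw [ih (ix + 1) l2 (by simp only [PySem.List.len_eq] at hend ⊢; omega)
        (by simp only [PySem.Raise.InRange, PySem.List.len_eq] at hend ⊢; omega)]
      unfold make_lst_str_2_alt
      rfl

-- ===== VERDICT (by name: the statement is the Claim_ definition above) =====
theorem make_lst_str_2_spec : Claim_equal_make_lst_str_2 := by
  intro sets ix l _ hpre
  unfold Spec_make_lst_str_2
  exact pv_main sets (sets.length + 1 - ix).toNat ix l (le_refl _) hpre
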